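-- pv_equiv track=rewrite | github.com/xtx2022/Project-1 | find_maximum.py | find_local_maxima
-- ===== SOURCE A (Python) =====
-- def find_local_maxima(matrix):
--     rows = len(matrix)
--     cols = len(matrix[0])
--
--     def is_local_maxima(i, j):
--         current = matrix[i][j]
--         # Check all eight possible neighbors
--         neighbors = [
--             (i-1, j-1), (i-1, j), (i-1, j+1),
--             (i, j-1),            (i, j+1),
--             (i+1, j-1), (i+1, j), (i+1, j+1)
--         ]
--         for x, y in neighbors:
--             if 0 <= x < rows and 0 <= y < cols:
--                 if matrix[x][y] >= current:
--                     return False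
--         return True
--
--     local_maxima = []
--     for i in range(rows):
--         for j in range(cols):
--             if is_local_maxima(i, j):
--                 local_maxima.append((j, i))
--
--     return local_maxima
-- ===== SOURCE B (Python) =====
-- def find_local_maxima(matrix):
--     rows = len(matrix)
--     cols = len(matrix[0])
--     is_max = [[True] * cols for _ in range(rows)]
--     # One pass over the forward adjacency edges: each edge eliminates the
--     # smaller-or-equal side(s); equal cells eliminate each other.
--     for i in range(rows):
--         for j in range(cols):
--             a = matrix[i][j]
--             for dx, dy in ((0, 1), (1, 0), (1, 1), (1, -1)):
--                 x, y = i + dx, j + dy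
--                 if 0 <= x < rows and 0 <= y < cols:
--                     b = matrix[x][y]
--                     if a >= b:
--                         is_max[x][y] = False
--                     if b >= a:
--                         is_max[i][j] = False
--     return [(j, i) for i in range(rows) for j in range(cols) if is_max[i][j]]
-- ===== Notes on version B (the rewrite author's own statement) =====
-- stated objective: alternative
-- what changed: Replaces per-cell verification of all eight neighbours by a boolean flag grid with edge-based elimination: each forward adjacency edge (right, down, down-right, down-left) is examined once and marks the smaller-or-equal side(s) as non-maxima, then the surviving flags are collected.
import Mathlib
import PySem

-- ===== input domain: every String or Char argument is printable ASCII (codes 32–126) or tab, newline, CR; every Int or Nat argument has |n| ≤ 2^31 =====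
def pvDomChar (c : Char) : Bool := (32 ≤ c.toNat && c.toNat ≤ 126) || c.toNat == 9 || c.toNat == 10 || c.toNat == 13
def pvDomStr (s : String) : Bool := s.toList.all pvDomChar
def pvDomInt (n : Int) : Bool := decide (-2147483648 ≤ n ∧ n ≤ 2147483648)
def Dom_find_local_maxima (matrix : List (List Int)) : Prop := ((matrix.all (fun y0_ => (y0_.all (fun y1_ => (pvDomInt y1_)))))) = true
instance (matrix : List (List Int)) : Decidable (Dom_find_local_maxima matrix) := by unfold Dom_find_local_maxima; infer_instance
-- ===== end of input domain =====

-- B replaces per-cell 8-neighbour verification by a boolean flag grid with one-pass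
-- edge-based elimination over the four forward directions (objective: alternative).

-- matrix[x][y], total form; exact wherever Python's access succeeds (guaranteed under Pre_)
def pvMGet (matrix : List (List Int)) (x y : Int) : Int :=
  (PySem.List.pyGet? ((PySem.List.pyGet? matrix x).getD []) y).getD 0

-- ===== PORT A =====
def pvAIsMax (matrix : List (List Int)) (rows cols : Nat) (i j : Nat) : Bool :=
  let current := pvMGet matrix i j
  let neighbors : List (Int × Int) :=
    [((i:Int)-1, (j:Int)-1), ((i:Int)-1, (j:Int)), ((i:Int)-1, (j:Int)+1),
     ((i:Int), (j:Int)-1),                         ((i:Int), (j:Int)+1),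
     ((i:Int)+1, (j:Int)-1), ((i:Int)+1, (j:Int)), ((i:Int)+1, (j:Int)+1)]
  neighbors.all (fun p =>
    if 0 ≤ p.1 ∧ p.1 < (rows:Int) ∧ 0 ≤ p.2 ∧ p.2 < (cols:Int) then
      decide (pvMGet matrix p.1 p.2 < current)
    else true)

def find_local_maxima (matrix : List (List Int)) : List (Int × Int) :=
  let rows := matrix.length
  let cols := ((PySem.List.pyGet? matrix 0).getD []).length
  (List.range rows).foldl (fun acc i =>
    (List.range cols).foldl (fun acc j =>
      if pvAIsMax matrix rows cols i j then acc ++ [((j:Int), (i:Int))] else acc) acc) []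

-- ===== PORT B =====
def pvBDirs : List (Int × Int) := [(0, 1), (1, 0), (1, 1), (1, -1)]

-- is_max[x][y] = False
def pvBClear (g : List (List Bool)) (x y : Nat) : List (List Bool) :=
  g.modify x (fun row => row.set y false)

-- is_max[x][y] (total read; out of range reads False, only used in range)
def pvBGet (g : List (List Bool)) (x y : Nat) : Bool :=
  (g.getD x []).getD y false

-- body of one (i, j) iteration: the inner loop over the four forward directions
def pvBStep1 (matrix : List (List Int)) (rows cols : Nat) (i j : Nat)
    (g : List (List Bool)) (d : Int × Int) : List (List Bool) :=
  let a := pvMGet matrix i j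
  let x := (i:Int) + d.1
  let y := (j:Int) + d.2
  if 0 ≤ x ∧ x < (rows:Int) ∧ 0 ≤ y ∧ y < (cols:Int) then
    let b := pvMGet matrix x y
    let g1 := if a ≥ b then pvBClear g x.toNat y.toNat else g
    if b ≥ a then pvBClear g1 i j else g1
  else g

def pvBStep (matrix : List (List Int)) (rows cols : Nat) (i j : Nat)
    (g : List (List Bool)) : List (List Bool) :=
  pvBDirs.foldl (pvBStep1 matrix rows cols i j) g

def find_local_maxima_alt (matrix : List (List Int)) : List (Int × Int) :=
  let rows := matrix.length
  let cols := ((PySem.List.pyGet? matrix 0).getD []).length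
  let init := List.replicate rows (List.replicate cols true)
  let g := (List.range rows).foldl (fun g i =>
    (List.range cols).foldl (fun g j => pvBStep matrix rows cols i j g) g) init
  (List.range rows).flatMap (fun i =>
    (List.range cols).filterMap (fun j =>
      if pvBGet g i j then some ((j:Int), (i:Int)) else none))

-- ===== PRECONDITION & SPEC =====
-- Pre_ excludes exactly the inputs on which the Python A raises (IndexError): the
-- empty matrix (matrix[0]) and ragged matrices with a row shorter than the first row.
def Pre_find_local_maxima (matrix : List (List Int)) : Prop :=
  matrix ≠ [] ∧ ∀ row ∈ matrix, (matrix.headD []).length ≤ row.length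
instance (matrix : List (List Int)) : Decidable (Pre_find_local_maxima matrix) := by
  unfold Pre_find_local_maxima; infer_instance

def pvWitness_find_local_maxima : List (List Int) := [[1, 2], [3, 4]]

def Spec_find_local_maxima (matrix : List (List Int)) (out : List (Int × Int)) : Prop := out = find_local_maxima_alt matrix
instance (matrix : List (List Int)) (out : List (Int × Int)) : Decidable (Spec_find_local_maxima matrix out) := by unfold Spec_find_local_maxima; infer_instance

-- ===== CLAIM (what is proved, stated in full; the proofs are below) =====
def Claim_equal_find_local_maxima : Prop := ∀ (matrix : List (List Int)), Dom_find_local_maxima matrix → Pre_find_local_maxima matrix → Spec_find_local_maxima matrix (find_local_maxima matrix)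

-- ===== LEMMAS AND PROOFS =====
-- per-direction elimination condition: what the pvBStep1 iteration at (i, j) with
-- direction d does to the flag of cell (p, q)
def pvCleared1 (matrix : List (List Int)) (rows cols : Nat) (i j : Nat)
    (d : Int × Int) (p q : Nat) : Bool :=
  let x := (i:Int) + d.1
  let y := (j:Int) + d.2
  decide (0 ≤ x ∧ x < (rows:Int) ∧ 0 ≤ y ∧ y < (cols:Int)) &&
    ((decide (pvMGet matrix i j ≥ pvMGet matrix x y) && decide (x = (p:Int) ∧ y = (q:Int))) ||
     (decide (pvMGet matrix x y ≥ pvMGet matrix i j) && decide (i = p ∧ j = q)))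

def pvCleared (matrix : List (List Int)) (rows cols : Nat) (i j p q : Nat) : Bool :=
  pvBDirs.any (fun d => pvCleared1 matrix rows cols i j d p q)

-- the 3×3-neighbourhood predicate both programs decide
def pvP (matrix : List (List Int)) (rows cols : Nat) (p q : Nat) : Prop :=
  ∀ x y : Int, 0 ≤ x → x < (rows:Int) → 0 ≤ y → y < (cols:Int) →
    ¬(x = (p:Int) ∧ y = (q:Int)) → x - p ≤ 1 → (p:Int) - x ≤ 1 → y - q ≤ 1 → (q:Int) - y ≤ 1 →
    pvMGet matrix x y < pvMGet matrix p q

lemma pvBGet_clear (g : List (List Bool)) (x y p q : Nat) :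
    pvBGet (pvBClear g x y) p q = if x = p ∧ y = q then false else pvBGet g p q := by
  unfold pvBGet pvBClear
  by_cases hx : x = p
  · subst hx
    cases hgp : g[x]? with
    | none => simp [List.getD_eq_getElem?_getD, hgp]
    | some row =>
      by_cases hy : y = q
      · subst hy
        simp [List.getD_eq_getElem?_getD, hgp, List.getElem?_set]
        split <;> simp
      · simp [List.getD_eq_getElem?_getD, hgp, List.getElem?_set_ne hy, hy]
  · simp [List.getD_eq_getElem?_getD, hx]

lemma pvBGet_step1 (matrix : List (List Int)) (rows cols i j p q : Nat) (g : List (List Bool))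
    (d : Int × Int) :
    pvBGet (pvBStep1 matrix rows cols i j g d) p q =
      (pvBGet g p q && !(pvCleared1 matrix rows cols i j d p q)) := by
  unfold pvBStep1 pvCleared1
  by_cases hr : 0 ≤ (i:Int)+d.1 ∧ (i:Int)+d.1 < (rows:Int) ∧ 0 ≤ (j:Int)+d.2 ∧ (j:Int)+d.2 < (cols:Int)
  · have ex : (((i:Int)+d.1).toNat = p ∧ ((j:Int)+d.2).toNat = q) ↔
        ((i:Int)+d.1 = (p:Int) ∧ (j:Int)+d.2 = (q:Int)) := by omega
    by_cases h1 : pvMGet matrix i j ≥ pvMGet matrix ((i:Int)+d.1) ((j:Int)+d.2) <;>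
    by_cases h2 : pvMGet matrix ((i:Int)+d.1) ((j:Int)+d.2) ≥ pvMGet matrix i j <;>
      [skip; skip; skip; omega] <;>
      simp [hr.1, hr.2.1, hr.2.2.1, hr.2.2.2, h1, h2, pvBGet_clear, ex,
        Bool.and_comm, Bool.and_left_comm]
  · simp [hr]

lemma pvBGet_foldl {α : Type} (F : List (List Bool) → α → List (List Bool)) (c : α → Bool)
    (p q : Nat) (h : ∀ g a, pvBGet (F g a) p q = (pvBGet g p q && !(c a))) :
    ∀ (l : List α) (g : List (List Bool)),
      pvBGet (l.foldl F g) p q = (pvBGet g p q && l.all (fun a => !(c a))) := by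
  intro l
  induction l with
  | nil => intro g; simp
  | cons a l ih =>
    intro g
    simp [List.foldl_cons, ih, h, Bool.and_assoc]

lemma pvBGet_step (matrix : List (List Int)) (rows cols i j p q : Nat) (g : List (List Bool)) :
    pvBGet (pvBStep matrix rows cols i j g) p q =
      (pvBGet g p q && !(pvCleared matrix rows cols i j p q)) := by
  unfold pvBStep
  rw [pvBGet_foldl (pvBStep1 matrix rows cols i j)
    (fun d => pvCleared1 matrix rows cols i j d p q) p q
    (fun g d => pvBGet_step1 matrix rows cols i j p q g d) pvBDirs g]
  simp [pvCleared, List.not_any_eq_all_not]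

lemma pvBGet_init (rows cols p q : Nat) :
    pvBGet (List.replicate rows (List.replicate cols true)) p q = decide (p < rows ∧ q < cols) := by
  unfold pvBGet
  by_cases hp : p < rows <;> by_cases hq : q < cols <;>
    simp [List.getD_eq_getElem?_getD, hp, hq]

lemma pvCleared1_iff (matrix : List (List Int)) (rows cols i j p q : Nat) (d : Int × Int) :
    pvCleared1 matrix rows cols i j d p q = true ↔
      (0 ≤ (i:Int)+d.1 ∧ (i:Int)+d.1 < (rows:Int) ∧ 0 ≤ (j:Int)+d.2 ∧ (j:Int)+d.2 < (cols:Int)) ∧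
      ((pvMGet matrix i j ≥ pvMGet matrix ((i:Int)+d.1) ((j:Int)+d.2) ∧
          ((i:Int)+d.1 = (p:Int) ∧ (j:Int)+d.2 = (q:Int))) ∨
       (pvMGet matrix ((i:Int)+d.1) ((j:Int)+d.2) ≥ pvMGet matrix i j ∧ (i = p ∧ j = q))) := by
  simp [pvCleared1]

lemma pvAIsMax_iff (matrix : List (List Int)) (rows cols p q : Nat) :
    pvAIsMax matrix rows cols p q = true ↔ pvP matrix rows cols p q := by
  unfold pvAIsMax pvP
  simp only [List.all_cons, List.all_nil, Bool.and_true, Bool.and_eq_true,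
    Bool.if_true_right, Bool.or_eq_true, Bool.not_eq_eq_eq_not, Bool.not_true,
    decide_eq_false_iff_not, decide_eq_true_eq, or_iff_not_imp_left, not_not]
  constructor
  · rintro ⟨c1, c2, c3, c4, c5, c6, c7, c8⟩ x y h0 h1 h2 h3 hne ha hb hc hd
    have hx : x = (p:Int) - 1 ∨ x = (p:Int) ∨ x = (p:Int) + 1 := by omega
    have hy : y = (q:Int) - 1 ∨ y = (q:Int) ∨ y = (q:Int) + 1 := by omega
    rcases hx with hx|hx|hx <;> rcases hy with hy|hy|hy <;> subst hx hy
    · exact c1 ⟨h0, h1, h2, h3⟩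
    · exact c2 ⟨h0, h1, h2, h3⟩
    · exact c3 ⟨h0, h1, h2, h3⟩
    · exact c4 ⟨h0, h1, h2, h3⟩
    · exact absurd ⟨rfl, rfl⟩ hne
    · exact c5 ⟨h0, h1, h2, h3⟩
    · exact c6 ⟨h0, h1, h2, h3⟩
    · exact c7 ⟨h0, h1, h2, h3⟩
    · exact c8 ⟨h0, h1, h2, h3⟩
  · intro hP
    refine ⟨?_, ?_, ?_, ?_, ?_, ?_, ?_, ?_⟩ <;>
      (rintro ⟨h0, h1, h2, h3⟩;
       exact hP _ _ h0 h1 h2 h3 (by omega) (by omega) (by omega) (by omega) (by omega))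

lemma pvCleared_iff (matrix : List (List Int)) (rows cols p q : Nat)
    (hp : p < rows) (hq : q < cols) :
    ((List.range rows).all fun i => (List.range cols).all fun j =>
        !(pvCleared matrix rows cols i j p q)) = true ↔ pvP matrix rows cols p q := by
  simp only [List.all_eq_true, List.mem_range, Bool.not_eq_eq_eq_not, Bool.not_true,
    Bool.eq_false_iff, Ne, pvCleared, List.any_eq_true, pvBDirs, List.mem_cons,
    List.not_mem_nil, or_false, pvCleared1_iff]
  constructor
  · intro H x y h0 h1 h2 h3 hne ha hb hc hd
    by_contra hlt
    push Not at hlt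
    have hx : x = (p:Int) - 1 ∨ x = (p:Int) ∨ x = (p:Int) + 1 := by omega
    have hy : y = (q:Int) - 1 ∨ y = (q:Int) ∨ y = (q:Int) + 1 := by omega
    rcases hx with hx|hx|hx <;> rcases hy with hy|hy|hy <;> subst hx hy
    · exact H (p-1) (by omega) (q-1) (by omega)
        ⟨(1,1), by decide, by omega, Or.inl ⟨by
          simpa [show ((p-1:Nat):Int) = (p:Int)-1 from by omega,
            show ((q-1:Nat):Int) = (q:Int)-1 from by omega] using hlt, by omega⟩⟩
    · exact H (p-1) (by omega) q hq
        ⟨(1,0), by decide, by omega, Or.inl ⟨by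
          simpa [show ((p-1:Nat):Int) = (p:Int)-1 from by omega] using hlt, by omega⟩⟩
    · exact H (p-1) (by omega) (q+1) (by omega)
        ⟨(1,-1), by decide, by omega, Or.inl ⟨by
          simpa [show ((p-1:Nat):Int) = (p:Int)-1 from by omega,
            show ((q+1:Nat):Int) = (q:Int)+1 from by omega] using hlt, by omega⟩⟩
    · exact H p hp (q-1) (by omega)
        ⟨(0,1), by decide, by omega, Or.inl ⟨by
          simpa [show ((q-1:Nat):Int) = (q:Int)-1 from by omega] using hlt, by omega⟩⟩
    · exact absurd ⟨rfl, rfl⟩ hne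
    · exact H p hp q hq
        ⟨(0,1), by decide, by omega, Or.inr ⟨by simpa using hlt, rfl, rfl⟩⟩
    · exact H p hp q hq
        ⟨(1,-1), by decide, by omega, Or.inr ⟨by simpa using hlt, rfl, rfl⟩⟩
    · exact H p hp q hq
        ⟨(1,0), by decide, by omega, Or.inr ⟨by simpa using hlt, rfl, rfl⟩⟩
    · exact H p hp q hq
        ⟨(1,1), by decide, by omega, Or.inr ⟨by simpa using hlt, rfl, rfl⟩⟩
  · intro hP a ha b hb
    rintro ⟨d, hd, hr, hcl⟩
    rcases hd with rfl | rfl | rfl | rfl <;>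
      (rcases hcl with ⟨hge, hex, hey⟩ | ⟨hge, rfl, rfl⟩
       · have h := hP a b (by omega) (by omega) (by omega) (by omega) (by omega)
           (by omega) (by omega) (by omega) (by omega)
         rw [hex, hey] at hge
         omega
       · have h := hP _ _ (by omega) hr.2.1 (by omega) hr.2.2.2 (by omega)
           (by omega) (by omega) (by omega) (by omega)
         omega)

lemma pvGrid_final (matrix : List (List Int)) (rows cols p q : Nat)
    (hp : p < rows) (hq : q < cols) :
    pvBGet ((List.range rows).foldl (fun g i =>
        (List.range cols).foldl (fun g j => pvBStep matrix rows cols i j g) g)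
        (List.replicate rows (List.replicate cols true))) p q
      = pvAIsMax matrix rows cols p q := by
  have houter : ∀ (g : List (List Bool)) (i : Nat),
      pvBGet ((List.range cols).foldl (fun g j => pvBStep matrix rows cols i j g) g) p q =
        (pvBGet g p q && !((List.range cols).any fun j => pvCleared matrix rows cols i j p q)) := by
    intro g i
    rw [pvBGet_foldl (fun g j => pvBStep matrix rows cols i j g)
      (fun j => pvCleared matrix rows cols i j p q) p q
      (fun g j => pvBGet_step matrix rows cols i j p q g) (List.range cols) g,
      List.not_any_eq_all_not]
  rw [pvBGet_foldl (fun g i => (List.range cols).foldl (fun g j => pvBStep matrix rows cols i j g) g)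
    (fun i => (List.range cols).any fun j => pvCleared matrix rows cols i j p q) p q
    houter (List.range rows) _, pvBGet_init]
  simp only [hp, hq, and_self, decide_true, Bool.true_and]
  have hall : ((List.range rows).all fun i =>
      !((List.range cols).any fun j => pvCleared matrix rows cols i j p q)) =
      ((List.range rows).all fun i => (List.range cols).all fun j =>
        !(pvCleared matrix rows cols i j p q)) := by
    simp [List.not_any_eq_all_not]
  rw [hall]
  have h3 := (pvCleared_iff matrix rows cols p q hp hq).trans
    (pvAIsMax_iff matrix rows cols p q).symm
  cases hb : ((List.range rows).all fun i => (List.range cols).all fun j =>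
      !(pvCleared matrix rows cols i j p q)) <;>
    cases hc : pvAIsMax matrix rows cols p q <;> simp_all

lemma pvFilterMapIf {α β : Type} (l : List α) (p : α → Bool) (f : α → β) :
    (l.filterMap fun x => if p x then some (f x) else none) = (l.filter p).map f := by
  induction l with
  | nil => simp
  | cons a l ih => by_cases h : p a <;> simp [h, ih]

-- ===== VERDICT (by name: the statement is the Claim_ definition above) =====
theorem find_local_maxima_spec : Claim_equal_find_local_maxima := by
  intro matrix _ _
  unfold Spec_find_local_maxima find_local_maxima find_local_maxima_alt
  simp only [pvFilterMapIf, PySem.List.foldl_append_if, PySem.List.foldl_append_eq_flatMap,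
    List.nil_append]
  apply List.flatMap_congr
  intro i hi
  rw [List.filter_congr (fun j hj => pvGrid_final matrix matrix.length
    ((PySem.List.pyGet? matrix 0).getD []).length i j
    (List.mem_range.mp hi) (List.mem_range.mp hj))]
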